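-- pv_equiv track=rewrite | github.com/MQjehovah/agent | src/memory/archiver.py | _extract_valuable_content
-- ===== SOURCE A (Python) =====
-- def _extract_valuable_content(content: str) -> str:
--     """提取有价值的内容 — 保留所有分类，只排除空段落"""
--     lines = content.split("\n")
--     valuable = []
--     current_section_has_content = False
--
--     for line in lines:
--         if line.startswith("# ") and not line.startswith("## "):
--             # 顶级标题，保留
--             valuable.append(line)
--             current_section_has_content = False
--         elif line.startswith("## "):
--             # 二级分类标题，保留
--             valuable.append(line)
--             current_section_has_content = False
--         elif line.strip():
--             valuable.append(line)
--             current_section_has_content = True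
--
--     # 移除没有内容的空段落（标题后无实质内容）
--     result = []
--     i = 0
--     while i < len(valuable):
--         line = valuable[i]
--         if line.startswith("## ") and i + 1 < len(valuable) and valuable[i + 1].startswith("## "):
--             # 空段落：分类标题后紧跟下一个分类标题
--             pass  # skip empty section
--         else:
--             result.append(line)
--         i += 1
--
--     return "\n".join(result) if result else ""
-- ===== SOURCE B (Python) =====
-- def _extract_valuable_content(content: str) -> str:
--     """One pass: skip blank lines; hold each '## ' header in a pending slot,
--     emitting it only once a non-header content line confirms its section."""
--     result = []
--     pending = None
--     for line in content.split("\n"):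
--         if not line.strip():
--             continue
--         if pending is not None:
--             if not line.startswith("## "):
--                 result.append(pending)
--             pending = None
--         if line.startswith("## "):
--             pending = line
--         else:
--             result.append(line)
--     if pending is not None:
--         result.append(pending)
--     return "\n".join(result) if result else ""
-- ===== Notes on version B (the rewrite author's own statement) =====
-- stated objective: simpler
-- what changed: Replaces A's two passes (build a 'valuable' list, then re-scan it with an index lookahead to drop '## ' headers followed by another '## ' header) with a single pass holding one pending-header slot that is emitted or dropped when the next non-blank line is seen.
import Mathlib
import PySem

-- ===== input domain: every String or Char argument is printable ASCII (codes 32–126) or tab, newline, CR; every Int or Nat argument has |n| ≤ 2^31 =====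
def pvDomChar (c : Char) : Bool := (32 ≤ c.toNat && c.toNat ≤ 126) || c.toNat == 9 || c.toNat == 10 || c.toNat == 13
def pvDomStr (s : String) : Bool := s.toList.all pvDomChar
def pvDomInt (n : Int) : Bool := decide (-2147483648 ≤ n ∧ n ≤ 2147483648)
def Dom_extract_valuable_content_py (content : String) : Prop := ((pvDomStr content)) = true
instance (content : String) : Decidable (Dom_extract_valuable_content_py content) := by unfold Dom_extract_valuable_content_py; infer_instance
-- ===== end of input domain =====

-- B = one pass with a pending '## '-header slot instead of A's two passes (filter then index-lookahead scan); same return value, objective: simpler.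

-- ===== PORT A =====
-- A's second pass: 'while i < len(valuable)', skipping valuable[i] when it is a '## '
-- header and valuable[i+1] is also one; transcribed as recursion with the same one-line lookahead.
def pvDropEmpty : List (List Char) → List (List Char)
  | [] => []
  | [line] => [line]
  | line :: next :: rest =>
    if PySem.Chars.startswith line ['#', '#', ' '] && PySem.Chars.startswith next ['#', '#', ' '] then
      pvDropEmpty (next :: rest)
    else
      line :: pvDropEmpty (next :: rest)

-- A's first loop body (the three keep-branches; current_section_has_content is never read and is omitted).
def pvStepA (acc : List (List Char)) (line : List Char) : List (List Char) :=
  if PySem.Chars.startswith line ['#', ' '] && !PySem.Chars.startswith line ['#', '#', ' '] then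
    acc ++ [line]
  else if PySem.Chars.startswith line ['#', '#', ' '] then
    acc ++ [line]
  else if PySem.Chars.strip line ≠ [] then
    acc ++ [line]
  else acc

def extract_valuable_content_py (content : String) : String :=
  let lines := PySem.Chars.splitOn content.toList ['\n']
  let valuable := lines.foldl pvStepA []
  let result := pvDropEmpty valuable
  if result ≠ [] then String.ofList (PySem.Chars.join ['\n'] result) else ""

-- ===== PORT B =====
def pvStepB (st : List (List Char) × Option (List Char)) (line : List Char) :
    List (List Char) × Option (List Char) :=
  if PySem.Chars.strip line = [] then st
  else
    let acc := match st.2 with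
      | some p => if PySem.Chars.startswith line ['#', '#', ' '] then st.1 else st.1 ++ [p]
      | none => st.1
    if PySem.Chars.startswith line ['#', '#', ' '] then (acc, some line) else (acc ++ [line], none)

def extract_valuable_content_py_alt (content : String) : String :=
  let st := (PySem.Chars.splitOn content.toList ['\n']).foldl pvStepB ([], none)
  let result := st.1 ++ st.2.toList
  if result ≠ [] then String.ofList (PySem.Chars.join ['\n'] result) else ""

-- ===== PRECONDITION & SPEC =====
def Spec_extract_valuable_content_py (content : String) (out : String) : Prop := out = extract_valuable_content_py_alt content
instance (content : String) (out : String) : Decidable (Spec_extract_valuable_content_py content out) := by unfold Spec_extract_valuable_content_py; infer_instance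

-- ===== CLAIM (what is proved, stated in full; the proofs are below) =====
def Claim_equal_extract_valuable_content_py : Prop := ∀ (content : String), Dom_extract_valuable_content_py content → Spec_extract_valuable_content_py content (extract_valuable_content_py content)

-- ===== LEMMAS AND PROOFS =====

-- A line starting with '#' has a non-empty strip (‘#’ is not whitespace).
lemma strip_ne_nil_of_hash {l t : List Char}
    (h : PySem.Chars.startswith l ('#' :: t) = true) : PySem.Chars.strip l ≠ [] := by
  rw [PySem.Chars.startswith] at h
  obtain ⟨r, rfl⟩ := List.isPrefixOf_iff_prefix.mp h
  simp [PySem.Chars.strip, PySem.Chars.lstrip, PySem.Chars.rstrip, PySem.Chars.isspace,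
    List.dropWhile_eq_nil_iff]
  exact ⟨'#', Or.inr (Or.inr rfl), by decide⟩

-- A's first loop collects exactly the lines with non-empty strip.
lemma a_fold_eq_filter (lines : List (List Char)) (acc : List (List Char)) :
    lines.foldl pvStepA acc
    = acc ++ lines.filter (fun l => decide (PySem.Chars.strip l ≠ [])) := by
  induction lines generalizing acc with
  | nil => simp
  | cons l ls ih =>
    rw [List.foldl_cons, List.filter_cons]
    by_cases h2 : PySem.Chars.startswith l ['#', '#', ' '] = true
    · rw [show pvStepA acc l = acc ++ [l] from by simp [pvStepA, h2],
        if_pos (by simp [strip_ne_nil_of_hash h2]), ih]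
      simp
    · by_cases h1 : PySem.Chars.startswith l ['#', ' '] = true
      · rw [show pvStepA acc l = acc ++ [l] from by simp [pvStepA, h1, h2],
          if_pos (by simp [strip_ne_nil_of_hash h1]), ih]
        simp
      · by_cases h3 : PySem.Chars.strip l = []
        · rw [show pvStepA acc l = acc from by simp [pvStepA, h1, h2, h3],
            if_neg (by simp [h3]), ih]
        · rw [show pvStepA acc l = acc ++ [l] from by simp [pvStepA, h1, h2, h3],
            if_pos (by simp [h3]), ih]
          simp

lemma dropEmpty_cons_not_header {x : List Char} {r : List (List Char)}
    (hx : PySem.Chars.startswith x ['#', '#', ' '] = false) :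
    pvDropEmpty (x :: r) = x :: pvDropEmpty r := by
  cases r with
  | nil => rfl
  | cons y t => simp [pvDropEmpty, hx]

lemma dropEmpty_cons_cons_header {p x : List Char} {r : List (List Char)}
    (hp : PySem.Chars.startswith p ['#', '#', ' '] = true)
    (hx : PySem.Chars.startswith x ['#', '#', ' '] = true) :
    pvDropEmpty (p :: x :: r) = pvDropEmpty (x :: r) := by
  simp [pvDropEmpty, hp, hx]

lemma dropEmpty_cons_cons_not_header {p x : List Char} {r : List (List Char)}
    (hx : PySem.Chars.startswith x ['#', '#', ' '] = false) :
    pvDropEmpty (p :: x :: r) = p :: pvDropEmpty (x :: r) := by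
  simp [pvDropEmpty, hx]

-- The invariant of B's loop: flushing the state after the fold yields A's
-- lookahead scan applied to (pending header, if any) followed by the non-blank lines.
lemma b_fold_invariant (lines : List (List Char)) (acc : List (List Char))
    (pend : Option (List Char))
    (hp : ∀ p ∈ pend, PySem.Chars.startswith p ['#', '#', ' '] = true) :
    (let st := lines.foldl pvStepB (acc, pend); st.1 ++ st.2.toList)
    = acc ++ pvDropEmpty (pend.toList ++ lines.filter (fun l => decide (PySem.Chars.strip l ≠ []))) := by
  induction lines generalizing acc pend with
  | nil =>
    cases pend with
    | none => simp [pvDropEmpty]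
    | some p => simp [pvDropEmpty]
  | cons l ls ih =>
    rw [List.foldl_cons, List.filter_cons]
    by_cases h0 : PySem.Chars.strip l = []
    · rw [show pvStepB (acc, pend) l = (acc, pend) from by simp [pvStepB, h0],
        if_neg (by simp [h0])]
      exact ih acc pend hp
    · rw [if_pos (by simp [h0])]
      by_cases h1 : PySem.Chars.startswith l ['#', '#', ' '] = true
      · cases pend with
        | none =>
          rw [show pvStepB (acc, none) l = (acc, some l) from by simp [pvStepB, h0, h1],
            ih acc (some l) (by simpa using h1)]
          simp
        | some p =>
          rw [show pvStepB (acc, some p) l = (acc, some l) from by simp [pvStepB, h0, h1],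
            ih acc (some l) (by simpa using h1)]
          have hps := hp p (by simp)
          simp [dropEmpty_cons_cons_header hps h1]
      · have hxf : PySem.Chars.startswith l ['#', '#', ' '] = false := by simpa using h1
        cases pend with
        | none =>
          rw [show pvStepB (acc, none) l = (acc ++ [l], none) from by simp [pvStepB, h0, h1],
            ih (acc ++ [l]) none (by simp)]
          simp only [Option.toList_none, List.nil_append]
          rw [dropEmpty_cons_not_header hxf]
          simp
        | some p =>
          rw [show pvStepB (acc, some p) l = (acc ++ [p] ++ [l], none) from by
              simp [pvStepB, h0, h1, List.append_assoc],
            ih (acc ++ [p] ++ [l]) none (by simp)]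
          simp only [Option.toList_none, Option.toList_some, List.nil_append,
            List.cons_append, List.nil_append]
          rw [dropEmpty_cons_cons_not_header hxf, dropEmpty_cons_not_header hxf]
          simp [List.append_assoc]

-- ===== VERDICT (by name: the statement is the Claim_ definition above) =====
theorem extract_valuable_content_py_spec : Claim_equal_extract_valuable_content_py := by
  intro content _
  have hB := b_fold_invariant (PySem.Chars.splitOn content.toList ['\n']) [] none (by simp)
  simp only [Option.toList_none, List.nil_append] at hB
  unfold Spec_extract_valuable_content_py
  simp only [extract_valuable_content_py, extract_valuable_content_py_alt,
    a_fold_eq_filter, List.nil_append]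
  rw [hB]
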